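-- pv_equiv track=rewrite | github.com/subhamchawda01/SubhamTwoRoads | MIDTERM/basetrade/pylib/pnl_modelling_utils/weights_util.py | generate_weight_grid
-- ===== SOURCE A (Python) =====
-- def generate_weight_grid(indx, num_indicators, max_sum):
--     """
--     Given a sum value, generate weight combinations with max weight equalling the max sum/2
--     :param indx:
--     :param num_indicators:
--     :param max_sum:
--     :return:
--     """
--     w = list(range(1, int(max_sum / 2) + 1))
--
--     # w = [0, 1, 2, 3, 4, 5]
--     grid = []
--     if indx == num_indicators - 1:
--         for x in w:
--             temp = [x]
--             grid.append(temp)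
--         return grid
--     temp_grid = generate_weight_grid(indx + 1, num_indicators, max_sum)
--     for i in range(len(w)):
--         for x in temp_grid:
--             temp = list([w[i]] + x)
--             grid.append(temp)
--     return grid
-- ===== SOURCE B (Python) =====
-- def generate_weight_grid(indx, num_indicators, max_sum):
--     """Iterative rebuild: fold the Cartesian-product step instead of recursing.
--
--     Valid positions are indx <= num_indicators - 1 (where A's recursion
--     reaches its base case); outside that A never terminates, B rejects.
--     """
--     if indx > num_indicators - 1:
--         raise ValueError("indx must be at most num_indicators - 1")
--     w = list(range(1, int(max_sum / 2) + 1))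
--     grid = [[x] for x in w]
--     for _ in range(num_indicators - indx - 1):
--         grid = [[v] + row for v in w for row in grid]
--     return grid
-- ===== Notes on version B (the rewrite author's own statement) =====
-- stated objective: simpler
-- what changed: Replaced A's recursion on indx (with nested index/append loops) by a single iterative comprehension fold that applies the Cartesian-product step num_indicators-indx-1 times to the singleton grid; B validates indx <= num_indicators-1 (where A never terminates) instead of recursing forever.
import Mathlib
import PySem

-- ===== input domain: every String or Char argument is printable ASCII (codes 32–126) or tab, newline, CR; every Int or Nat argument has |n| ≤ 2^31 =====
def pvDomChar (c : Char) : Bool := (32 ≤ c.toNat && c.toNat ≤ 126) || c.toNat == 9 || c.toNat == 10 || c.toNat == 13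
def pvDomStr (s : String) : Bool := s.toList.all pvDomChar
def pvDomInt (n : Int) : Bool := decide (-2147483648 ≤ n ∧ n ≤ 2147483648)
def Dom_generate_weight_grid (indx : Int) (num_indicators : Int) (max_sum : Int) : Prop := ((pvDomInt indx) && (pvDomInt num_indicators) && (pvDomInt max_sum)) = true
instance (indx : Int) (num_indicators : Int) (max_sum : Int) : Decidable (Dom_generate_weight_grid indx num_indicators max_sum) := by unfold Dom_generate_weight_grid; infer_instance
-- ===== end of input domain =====

-- B replaces A's recursion by an iterative Cartesian-product fold (same values, same order); objective: simpler.

-- ===== PORT A =====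
-- A recurses on indx; fuel = (num_indicators - indx).toNat is a pure totality device
-- (under Pre_ the base case is always reached before fuel runs out).
def genA (indx : Int) (num_indicators : Int) (max_sum : Int) (fuel : Nat) : List (List Int) :=
  let w := PySem.List.pyRange 1 (PySem.Int.truncdiv max_sum 2 + 1) 1
  if indx = num_indicators - 1 then
    w.foldl (fun g x => g ++ [[x]]) []
  else
    match fuel with
    | 0 => []
    | f + 1 =>
      let temp_grid := genA (indx + 1) num_indicators max_sum f
      (PySem.List.pyRange 0 (PySem.List.len w) 1).foldl
        (fun g i => temp_grid.foldl (fun g x => g ++ [PySem.List.pyGetD w i 0 :: x]) g) []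

def generate_weight_grid (indx : Int) (num_indicators : Int) (max_sum : Int) : List (List Int) :=
  genA indx num_indicators max_sum (num_indicators - indx).toNat

-- ===== PORT B =====
def generate_weight_grid_alt (indx : Int) (num_indicators : Int) (max_sum : Int) : List (List Int) :=
  -- Python B raises ValueError on indx > num_indicators - 1 (outside Pre_); [] stands in for the raise
  if num_indicators - 1 < indx then [] else
  let w := PySem.List.pyRange 1 (PySem.Int.truncdiv max_sum 2 + 1) 1
  let grid0 := w.map (fun x => [x])
  (List.range (num_indicators - indx - 1).toNat).foldl
    (fun grid _ => w.flatMap (fun v => grid.map (fun row => v :: row))) grid0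

-- ===== PRECONDITION & SPEC =====
-- Pre_ excludes indx > num_indicators - 1, where A's recursion never reaches its base case
-- and Python raises RecursionError.
def Pre_generate_weight_grid (indx : Int) (num_indicators : Int) (max_sum : Int) : Prop :=
  indx ≤ num_indicators - 1
instance (indx : Int) (num_indicators : Int) (max_sum : Int) : Decidable (Pre_generate_weight_grid indx num_indicators max_sum) := by unfold Pre_generate_weight_grid; infer_instance
def pvWitness_generate_weight_grid : Int × Int × Int := (0, 2, 5)

def Spec_generate_weight_grid (indx : Int) (num_indicators : Int) (max_sum : Int) (out : List (List Int)) : Prop := out = generate_weight_grid_alt indx num_indicators max_sum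
instance (indx : Int) (num_indicators : Int) (max_sum : Int) (out : List (List Int)) : Decidable (Spec_generate_weight_grid indx num_indicators max_sum out) := by unfold Spec_generate_weight_grid; infer_instance

-- ===== CLAIM (what is proved, stated in full; the proofs are below) =====
def Claim_equal_generate_weight_grid : Prop := ∀ (indx : Int) (num_indicators : Int) (max_sum : Int), Dom_generate_weight_grid indx num_indicators max_sum → Pre_generate_weight_grid indx num_indicators max_sum → Spec_generate_weight_grid indx num_indicators max_sum (generate_weight_grid indx num_indicators max_sum)

-- ===== LEMMAS AND PROOFS =====

-- One Cartesian-product step, as B computes it.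
def gwStep (w : List Int) (g : List (List Int)) : List (List Int) :=
  w.flatMap (fun v => g.map (fun row => v :: row))

-- A's nested append loops over range(len(w)) compute one gwStep.
lemma genA_combine (w : List Int) (temp : List (List Int)) :
    (PySem.List.pyRange 0 (PySem.List.len w) 1).foldl
      (fun g i => temp.foldl (fun g x => g ++ [PySem.List.pyGetD w i 0 :: x]) g) []
    = gwStep w temp := by
  calc (PySem.List.pyRange 0 (PySem.List.len w) 1).foldl
        (fun g i => temp.foldl (fun g x => g ++ [PySem.List.pyGetD w i 0 :: x]) g) []
      = (PySem.List.pyRange 0 (PySem.List.len w) 1).foldl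
        (fun g i => g ++ temp.map (fun x => PySem.List.pyGetD w i 0 :: x)) [] := by
        refine PySem.List.foldl_congr_mem _ _ _ [] ?_
        intro g i _
        exact PySem.List.foldl_append_singleton_eq_map (fun x => PySem.List.pyGetD w i 0 :: x) temp g
    _ = w.foldl (fun g v => g ++ temp.map (fun x => v :: x)) [] :=
        PySem.List.foldl_pyRange_zero_pyGetD w 0 (fun g v => g ++ temp.map (fun x => v :: x)) []
    _ = gwStep w temp := by
        rw [PySem.List.foldl_append_eq_flatMap]; rfl

-- A's base-case loop builds the singleton grid.
lemma base_loop_eq_map (w : List Int) :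
    w.foldl (fun g x => g ++ [[x]]) [] = w.map (fun x => [x]) := by
  simpa using PySem.List.foldl_append_singleton_eq_map (fun x : Int => [x]) w []

-- iterating the step once more = applying it on the outside
lemma range_foldl_step (s : List (List Int) → List (List Int)) (init : List (List Int)) (n : Nat) :
    (List.range (n + 1)).foldl (fun g _ => s g) init = s ((List.range n).foldl (fun g _ => s g) init) := by
  rw [List.range_succ, List.foldl_append]; rfl

-- main invariant: with enough fuel, A's recursion computes B's fold
lemma genA_eq (num_indicators max_sum : Int) (fuel : Nat) :
    ∀ indx : Int, indx ≤ num_indicators - 1 → (num_indicators - 1 - indx).toNat ≤ fuel →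
    genA indx num_indicators max_sum fuel
      = (List.range (num_indicators - indx - 1).toNat).foldl
          (fun grid _ => gwStep (PySem.List.pyRange 1 (PySem.Int.truncdiv max_sum 2 + 1) 1) grid)
          ((PySem.List.pyRange 1 (PySem.Int.truncdiv max_sum 2 + 1) 1).map (fun x => [x])) := by
  induction fuel with
  | zero =>
    intro indx h1 h2
    have : indx = num_indicators - 1 := by omega
    subst this
    have h0 : (num_indicators - (num_indicators - 1) - 1).toNat = 0 := by omega
    simp only [genA, h0, List.range_zero, List.foldl_nil]
    exact base_loop_eq_map _
  | succ f ih =>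
    intro indx h1 h2
    by_cases hbase : indx = num_indicators - 1
    · subst hbase
      have h0 : (num_indicators - (num_indicators - 1) - 1).toNat = 0 := by omega
      simp only [genA, h0, List.range_zero, List.foldl_nil]
      exact base_loop_eq_map _
    · have hlt : indx < num_indicators - 1 := lt_of_le_of_ne h1 hbase
      simp only [genA, if_neg hbase]
      rw [ih (indx + 1) (by omega) (by omega), genA_combine]
      have hn : (num_indicators - indx - 1).toNat = (num_indicators - (indx + 1) - 1).toNat + 1 := by
        omega
      rw [hn, range_foldl_step]

-- ===== VERDICT (by name: the statement is the Claim_ definition above) =====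
theorem generate_weight_grid_spec : Claim_equal_generate_weight_grid := by
  intro indx num_indicators max_sum _ hpre
  unfold Spec_generate_weight_grid generate_weight_grid generate_weight_grid_alt
  rw [if_neg (by unfold Pre_generate_weight_grid at hpre; omega)]
  exact genA_eq num_indicators max_sum _ indx hpre (by omega)
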